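-- pv_equiv track=rewrite | github.com/oils-for-unix/oils | core/qstr.py | qstr_encode
-- ===== SOURCE A (Python) =====
-- def qstr_encode(s, decode_utf8=False):
--   quote = 0
--
--   if len(s) == 0:
--     quote = 1
--   else:
--     for ch in s:
--       # [a-zA-Z0-9._-\_] are filename chars and don't need quotes
--       if (ch in '.-_' or
--           'a' < ch and ch < 'z' or
--           'A' < ch and ch < 'Z' or
--           '0' < ch and ch < '9'):
--         continue  # quote is still 0
--
--       quote = 1
--
--   parts = []
--
--   if quote:
--     parts.append("'")
--     _encode(s, parts, decode_utf8)
--     parts.append("'")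
--   else:
--     return s
--
--   return ''.join(parts)
--
-- def _encode(s, parts, decode_utf8):
--   """
--   QSTR has 6 char tests, and 1 char range test
--
--   str61 then?
--   c6r1 ?
--
--   6c7f
--   32 - 127 is printable
--
--   str127
--   str6c
--
--   Magic numbers: 6, ' ' = 32, 0x7f = 127
--   """
--
--   for ch in s:
--     # append to buffer
--     if ch == '\\':
--       part = r'\\'
--     elif ch == "'":
--       part = "\\'"
--     elif ch == '\n':
--       part = '\\n'
--     elif ch == '\r':
--       part = '\\r'
--     elif ch == '\t':
--       part = '\\t'
--     elif ch == '\0':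
--       part = '\\0'
--
--     elif ch < ' ' or ch >= '\x7f':
--       part = '\\x%02x' % ord(ch)
--
--     else:  # a literal  character
--       part = ch
--
--     parts.append(part)
-- ===== SOURCE B (Python) =====
-- _SPECIAL = {'\\': '\\\\', "'": "\\'", '\n': '\\n', '\r': '\\r', '\t': '\\t', '\0': '\\0'}
--
--
-- def _esc(ch):
--     part = _SPECIAL.get(ch)
--     if part is not None:
--         return part
--     if ch < ' ' or ch >= '\x7f':
--         return '\\x%02x' % ord(ch)
--     return ch
--
--
-- def qstr_encode(s, decode_utf8=False):
--     # single fused pass: decide quoting and build the escaped parts together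
--     quote = (len(s) == 0)
--     parts = []
--     for ch in s:
--         if not (ch in '.-_' or 'a' < ch < 'z' or 'A' < ch < 'Z' or '0' < ch < '9'):
--             quote = True
--         parts.append(_esc(ch))
--     if quote:
--         return "'" + ''.join(parts) + "'"
--     return s
-- ===== Notes on version B (the rewrite author's own statement) =====
-- stated objective: alternative
-- what changed: B fuses A's two separate full scans (the quote-decision loop and _encode's escaping loop) into a single pass that decides quoting and builds the escaped parts together, with the six special escapes taken from a dict instead of an if/elif chain.
import Mathlib
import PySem

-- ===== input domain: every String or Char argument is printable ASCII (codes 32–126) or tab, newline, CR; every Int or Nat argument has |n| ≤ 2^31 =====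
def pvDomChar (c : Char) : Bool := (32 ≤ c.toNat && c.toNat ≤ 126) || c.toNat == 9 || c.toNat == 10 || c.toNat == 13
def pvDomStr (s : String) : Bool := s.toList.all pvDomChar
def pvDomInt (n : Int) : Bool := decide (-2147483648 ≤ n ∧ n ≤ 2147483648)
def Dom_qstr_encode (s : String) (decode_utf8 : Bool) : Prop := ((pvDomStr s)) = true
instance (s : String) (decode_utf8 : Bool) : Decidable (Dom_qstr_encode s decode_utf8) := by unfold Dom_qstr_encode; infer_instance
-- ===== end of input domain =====

-- B fuses A's two full scans (quote-decision loop, then _encode loop) into one pass; return value only, no mutation observable.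

-- shared literal helpers (the same character predicate / '%02x' appear verbatim in both Pythons)
def isFilenameChar (ch : Char) : Bool :=
  (ch = '.' || ch = '-' || ch = '_') ||
  ('a' < ch && ch < 'z') ||
  ('A' < ch && ch < 'Z') ||
  ('0' < ch && ch < '9')

def pyHexDigit (n : Nat) : Char :=
  if n < 10 then Char.ofNat (48 + n) else Char.ofNat (87 + n)

-- '\x%02x' % ord(ch)  (exact for ord(ch) < 256, the only values either Python feeds it on Dom)
def pyHex2 (n : Nat) : String := String.mk ['\\', 'x', pyHexDigit (n / 16 % 16), pyHexDigit (n % 16)]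

-- ===== PORT A =====
-- body of _encode's per-character if/elif chain
def escA (ch : Char) : String :=
  if ch = '\\' then "\\\\"
  else if ch = '\'' then "\\'"
  else if ch = '\n' then "\\n"
  else if ch = '\r' then "\\r"
  else if ch = '\t' then "\\t"
  else if ch = Char.ofNat 0 then "\\0"
  else if ch < ' ' || Char.ofNat 127 ≤ ch then pyHex2 ch.toNat
  else String.mk [ch]

def qstr_encode (s : String) (decode_utf8 : Bool) : String :=
  let quote : Nat :=
    if s.toList.length = 0 then 1
    else s.toList.foldl (fun q ch => if isFilenameChar ch then q else 1) 0
  if quote ≠ 0 then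
    let parts : List String := ["'"]
    let parts := s.toList.foldl (fun ps ch => ps ++ [escA ch]) parts  -- _encode(s, parts, …)
    let parts := parts ++ ["'"]
    String.join parts
  else s

-- ===== PORT B =====
def escTableB : List (Char × String) :=
  [('\\', "\\\\"), ('\'', "\\'"), ('\n', "\\n"), ('\r', "\\r"), ('\t', "\\t"), (Char.ofNat 0, "\\0")]

def escB (ch : Char) : String :=
  match escTableB.lookup ch with
  | some part => part
  | none =>
    if ch < ' ' || Char.ofNat 127 ≤ ch then pyHex2 ch.toNat
    else String.mk [ch]

def qstr_encode_alt (s : String) (decode_utf8 : Bool) : String :=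
  let init : Bool × List String := (s.toList.length = 0, [])
  let st := s.toList.foldl
    (fun (st : Bool × List String) ch =>
      ((if isFilenameChar ch then st.1 else true), st.2 ++ [escB ch])) init
  if st.1 then "'" ++ String.join st.2 ++ "'" else s

-- ===== PRECONDITION & SPEC =====
def Spec_qstr_encode (s : String) (decode_utf8 : Bool) (out : String) : Prop := out = qstr_encode_alt s decode_utf8
instance (s : String) (decode_utf8 : Bool) (out : String) : Decidable (Spec_qstr_encode s decode_utf8 out) := by unfold Spec_qstr_encode; infer_instance

-- ===== CLAIM (what is proved, stated in full; the proofs are below) =====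
def Claim_equal_qstr_encode : Prop := ∀ (s : String) (decode_utf8 : Bool), Dom_qstr_encode s decode_utf8 → Spec_qstr_encode s decode_utf8 (qstr_encode s decode_utf8)

-- ===== LEMMAS AND PROOFS =====

lemma esc_eq (ch : Char) : escA ch = escB ch := by
  by_cases h1 : ch = '\\'
  · simp [escA, escB, escTableB, List.lookup, h1]
  by_cases h2 : ch = '\''
  · simp [escA, escB, escTableB, List.lookup, h2]
  by_cases h3 : ch = '\n'
  · simp [escA, escB, escTableB, List.lookup, h3]
  by_cases h4 : ch = '\r'
  · simp [escA, escB, escTableB, List.lookup, h4]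
  by_cases h5 : ch = '\t'
  · simp [escA, escB, escTableB, List.lookup, h5]
  by_cases h6 : ch = Char.ofNat 0
  · simp [escA, escB, escTableB, List.lookup, h6]
  simp [escA, escB, escTableB, List.lookup, h1, h2, h3, h4, h5, h6,
    beq_eq_false_iff_ne.mpr h1, beq_eq_false_iff_ne.mpr h2, beq_eq_false_iff_ne.mpr h3,
    beq_eq_false_iff_ne.mpr h4, beq_eq_false_iff_ne.mpr h5, beq_eq_false_iff_ne.mpr h6]

lemma foldA_eq (l : List Char) (q : Nat) :
    l.foldl (fun q ch => if isFilenameChar ch then q else 1) q =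
      if l.all isFilenameChar then q else 1 := by
  induction l generalizing q with
  | nil => simp
  | cons h t ih =>
    simp only [List.foldl_cons, List.all_cons]
    by_cases hf : isFilenameChar h <;> simp [hf, ih]

lemma fusedB_eq (l : List Char) (b : Bool) (ps : List String) :
    l.foldl (fun (st : Bool × List String) ch =>
        ((if isFilenameChar ch then st.1 else true), st.2 ++ [escB ch])) (b, ps) =
      ((if l.all isFilenameChar then b else true), ps ++ l.map escB) := by
  induction l generalizing b ps with
  | nil => simp
  | cons h t ih =>
    simp only [List.foldl_cons, List.all_cons, List.map_cons]
    rw [ih]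
    by_cases hf : isFilenameChar h <;> simp [hf]

lemma foldl_append_map (l : List Char) (ps : List String) (f : Char → String) :
    l.foldl (fun ps ch => ps ++ [f ch]) ps = ps ++ l.map f := by
  induction l generalizing ps with
  | nil => simp
  | cons h t ih => simp [ih]

lemma join_foldl (l : List String) (a : String) :
    l.foldl (· ++ ·) a = a ++ l.foldl (· ++ ·) "" := by
  induction l generalizing a with
  | nil => simp
  | cons h t ih =>
    simp only [List.foldl_cons]
    rw [ih (a ++ h), ih ("" ++ h)]
    simp [String.append_assoc]

lemma join_append (l₁ l₂ : List String) :
    String.join (l₁ ++ l₂) = String.join l₁ ++ String.join l₂ := by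
  simp only [String.join, List.foldl_append]
  rw [join_foldl]

-- ===== VERDICT (by name: the statement is the Claim_ definition above) =====
theorem qstr_encode_spec : Claim_equal_qstr_encode := by
  intro s decode_utf8 _
  unfold Spec_qstr_encode
  simp only [qstr_encode, qstr_encode_alt, fusedB_eq, foldl_append_map, foldA_eq]
  have hmap : s.toList.map escA = s.toList.map escB := List.map_congr_left fun ch _ => esc_eq ch
  have hne : s.toList.length ≠ 0 → s ≠ "" := fun h h' => h (by simp [h'])
  by_cases hlen : s.toList.length = 0
  · simp [hlen, List.eq_nil_of_length_eq_zero hlen, String.join]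
  · by_cases hall : s.toList.all isFilenameChar
    · simp [hne hlen, hall]
    · simp only [hlen, hall, if_false, ite_false, if_true, ne_eq, one_ne_zero,
        not_false_eq_true, decide_false, Bool.false_eq_true]
      rw [show (["'"] ++ s.toList.map escA ++ ["'"]) = ["'"] ++ (s.toList.map escA ++ ["'"]) by simp,
        join_append, join_append, hmap]
      simp [String.join, String.append_assoc]
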